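-- pv_equiv track=rewrite | github.com/jreznick/homecore | rcv.py | rcv_combos
-- ===== SOURCE A (Python) =====
-- def rcv_combos(c: int, r: int):
-- 	p = c - r
-- 	if 0 > p:
-- 		p = 0
-- 	fact = 1
-- 	remainder = list()
-- 	for i in range(c, p, -1):
-- 		fact = fact * i
-- 		remainder.append(fact)
-- 	remainder = remainder[:-1]
-- 	for value in remainder:
-- 		fact += value
--
-- 	return(fact)
-- ===== SOURCE B (Python) =====
-- def rcv_combos(c: int, r: int):
--     # Horner-style nested form: the answer equals
--     # (p+1)*(1+0) nested upward: acc = i*(1+acc) for i ascending p+1..c,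
--     # since sum_{k} c*(c-1)*...*(c-k+1) = c*(1 + (c-1)*(1 + ... (p+1)*(1+0)...)).
--     p = c - r
--     if p < 0:
--         p = 0
--     acc = 0
--     for i in range(p + 1, c + 1):
--         acc = i * (1 + acc)
--     return acc if c > p else 1
-- ===== Notes on version B (the rewrite author's own statement) =====
-- stated objective: alternative
-- what changed: B evaluates the sum of partial products in Horner nested form with a single accumulator acc = i*(1+acc) over an ascending range, replacing A's descending pass that maintains a running factorial, buffers every partial product in a list, drops the last and sums the rest in a second loop.
import Mathlib
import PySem

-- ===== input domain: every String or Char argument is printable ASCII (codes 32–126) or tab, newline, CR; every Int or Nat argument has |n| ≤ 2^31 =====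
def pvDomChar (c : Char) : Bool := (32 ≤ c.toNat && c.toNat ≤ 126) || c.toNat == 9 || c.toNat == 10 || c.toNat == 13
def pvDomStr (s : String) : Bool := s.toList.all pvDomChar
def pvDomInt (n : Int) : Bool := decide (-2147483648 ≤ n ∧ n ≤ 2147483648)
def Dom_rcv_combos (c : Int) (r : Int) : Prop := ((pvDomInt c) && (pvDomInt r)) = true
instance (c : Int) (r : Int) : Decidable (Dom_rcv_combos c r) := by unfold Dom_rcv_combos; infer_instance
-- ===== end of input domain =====

-- B replaces A's descending running-factorial pass with list buffer and second summing
-- loop by a Horner nested evaluation acc = i*(1+acc) over the ascending range.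

-- ===== PORT A =====
def rcv_combos (c : Int) (r : Int) : Int :=
  let p := c - r
  let p := if 0 > p then 0 else p
  let st := (PySem.List.pyRange c p (-1)).foldl
      (fun (s : Int × List Int) i => (s.1 * i, s.2 ++ [s.1 * i])) (1, [])
  let remainder := PySem.List.slice st.2 none (some (-1))
  remainder.foldl (fun f v => f + v) st.1

-- ===== PORT B =====
def rcv_combos_alt (c : Int) (r : Int) : Int :=
  let p := c - r
  let p := if p < 0 then 0 else p
  let acc := (PySem.List.pyRange (p + 1) (c + 1) 1).foldl (fun acc i => i * (1 + acc)) 0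
  if c > p then acc else 1

-- ===== PRECONDITION & SPEC =====
def Spec_rcv_combos (c : Int) (r : Int) (out : Int) : Prop := out = rcv_combos_alt c r
instance (c : Int) (r : Int) (out : Int) : Decidable (Spec_rcv_combos c r out) := by unfold Spec_rcv_combos; infer_instance

-- ===== CLAIM (what is proved, stated in full; the proofs are below) =====
def Claim_equal_rcv_combos : Prop := ∀ (c : Int) (r : Int), Dom_rcv_combos c r → Spec_rcv_combos c r (rcv_combos c r)

-- ===== LEMMAS AND PROOFS =====

-- partial products f*x1, f*x1*x2, … of a list, starting factor f
def pvPartials : List Int → Int → List Int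
  | [], _ => []
  | x :: xs, f => (f * x) :: pvPartials xs (f * x)

theorem pvPartials_ne_nil (l : List Int) (f : Int) (h : l ≠ []) : pvPartials l f ≠ [] := by
  cases l with
  | nil => exact absurd rfl h
  | cons x xs => simp [pvPartials]

theorem pvPartials_append_singleton (u : List Int) (x f : Int) :
    pvPartials (u ++ [x]) f = pvPartials u f ++ [f * u.prod * x] := by
  induction u generalizing f with
  | nil => simp [pvPartials]
  | cons y ys ih => simp [pvPartials, ih, mul_assoc]

theorem foldA_fst (l : List Int) (f : Int) (rem : List Int) :
    (l.foldl (fun (s : Int × List Int) i => (s.1 * i, s.2 ++ [s.1 * i])) (f, rem)).1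
      = f * l.prod := by
  induction l generalizing f rem with
  | nil => simp
  | cons x xs ih => simp [List.foldl, ih, mul_assoc]

theorem foldA_snd (l : List Int) (f : Int) (rem : List Int) :
    (l.foldl (fun (s : Int × List Int) i => (s.1 * i, s.2 ++ [s.1 * i])) (f, rem)).2
      = rem ++ pvPartials l f := by
  induction l generalizing f rem with
  | nil => simp [pvPartials]
  | cons x xs ih => simp [List.foldl, pvPartials, ih]

theorem foldl_add_eq (l : List Int) (a : Int) :
    l.foldl (fun x y => x + y) a = a + l.sum := by
  induction l generalizing a with
  | nil => simp
  | cons x xs ih => simp [List.foldl, ih]; ring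

-- Horner fold: shifting the start value
theorem horner_shift (l : List Int) (a : Int) :
    l.foldl (fun acc i => i * (1 + acc)) a
      = l.foldl (fun acc i => i * (1 + acc)) 0 + a * l.prod := by
  induction l generalizing a with
  | nil => simp
  | cons x xs ih =>
    simp only [List.foldl, List.prod_cons]
    rw [ih (x * (1 + a)), ih (x * (1 + 0))]
    ring

-- Horner fold over l equals the sum of partial products of l.reverse
theorem horner_eq_sum_partials_reverse (l : List Int) :
    l.foldl (fun acc i => i * (1 + acc)) 0 = (pvPartials l.reverse 1).sum := by
  induction l with
  | nil => simp [pvPartials]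
  | cons x xs ih =>
    simp only [List.foldl, List.reverse_cons]
    rw [horner_shift, ih, pvPartials_append_singleton]
    simp [List.prod_reverse]
    ring

-- for a nonempty list, sum of all partials = sum of all-but-last partials + full product
theorem sum_partials_split (l : List Int) (f : Int) (h : l ≠ []) :
    (pvPartials l f).sum = ((pvPartials l f).dropLast).sum + f * l.prod := by
  induction l generalizing f with
  | nil => exact absurd rfl h
  | cons x xs ih =>
    cases xs with
    | nil => simp [pvPartials]
    | cons y ys =>
      have hne : pvPartials (y :: ys) (f * x) ≠ [] := pvPartials_ne_nil _ _ (by simp)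
      have hih := ih (f := f * x) (by simp)
      show ((f * x) :: pvPartials (y :: ys) (f * x)).sum
          = ((f * x) :: pvPartials (y :: ys) (f * x)).dropLast.sum + f * (x :: y :: ys).prod
      rw [List.dropLast_cons_of_ne_nil hne, List.sum_cons, List.sum_cons, hih]
      simp [List.prod_cons]
      ring

theorem rcv_combos_eq_alt (c r : Int) : rcv_combos c r = rcv_combos_alt c r := by
  simp only [rcv_combos, rcv_combos_alt]
  have hp : (if 0 > c - r then 0 else c - r) = (if c - r < 0 then 0 else c - r) := by
    split_ifs <;> omega
  rw [hp]
  set p := if c - r < 0 then 0 else c - r with hpdef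
  have hrev : PySem.List.pyRange c p (-1) = (PySem.List.pyRange (p + 1) (c + 1) 1).reverse :=
    PySem.List.pyRange_neg_one_eq_reverse c p
  by_cases hc : p < c
  · -- nonempty range
    have hl : PySem.List.pyRange c p (-1) ≠ [] := by
      rw [PySem.List.pyRange_neg_one_cons hc]; simp
    simp only [PySem.List.slice_to_neg_one, foldA_fst, foldA_snd, foldl_add_eq,
      List.nil_append, if_pos (show c > p from hc)]
    rw [horner_eq_sum_partials_reverse, ← hrev]
    have := sum_partials_split (PySem.List.pyRange c p (-1)) 1 hl
    omega
  · -- empty range: A returns the initial fact = 1, B returns 1 in the else branch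
    have hnil : PySem.List.pyRange c p (-1) = [] := PySem.List.pyRange_neg_one_eq_nil (by omega)
    simp [hnil, PySem.List.slice_to_neg_one, if_neg (show ¬ c > p by omega)]

-- ===== VERDICT (by name: the statement is the Claim_ definition above) =====
theorem rcv_combos_spec : Claim_equal_rcv_combos := by
  intro c r _
  exact rcv_combos_eq_alt c r
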